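-- pv_equiv track=rewrite | github.com/1208julia/Kamus-python-Tkinter | Codefull (2).py | cari_kataDalamKalimat
-- ===== SOURCE A (Python) =====
-- def cari_kataDalamKalimat(kata, data):
--     kataDalamKalimat = None
--     for word, values in data.items():
--         for value in values:
--             if kata in value:
--                 kataDalamKalimat = word
--                 break  # Hanya temukan kecocokan pertama
--     return kataDalamKalimat
-- ===== SOURCE B (Python) =====
-- def cari_kataDalamKalimat(kata, data):
--     for word, values in reversed(data.items()):
--         if any(kata in value for value in values):
--             return word
--     return None
-- ===== Notes on version B (the rewrite author's own statement) =====
-- stated objective: simpler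
-- what changed: Replaces the full scan that keeps overwriting a running result (with a redundant inner break) by a reverse scan over the items that returns the first (i.e. last-in-order) matching word immediately.
import Mathlib
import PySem

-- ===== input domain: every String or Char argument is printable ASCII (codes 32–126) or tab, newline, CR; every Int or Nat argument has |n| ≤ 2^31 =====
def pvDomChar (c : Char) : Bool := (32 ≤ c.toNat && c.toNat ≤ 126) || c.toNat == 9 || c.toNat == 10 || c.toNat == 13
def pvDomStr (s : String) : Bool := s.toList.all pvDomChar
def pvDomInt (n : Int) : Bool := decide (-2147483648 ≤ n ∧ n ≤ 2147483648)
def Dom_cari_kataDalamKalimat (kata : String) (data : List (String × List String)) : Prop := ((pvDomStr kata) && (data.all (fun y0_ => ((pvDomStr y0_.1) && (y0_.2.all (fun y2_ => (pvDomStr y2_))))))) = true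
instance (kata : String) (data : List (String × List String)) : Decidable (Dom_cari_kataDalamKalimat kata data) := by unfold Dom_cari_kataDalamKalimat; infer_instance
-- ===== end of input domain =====

-- B replaces A's full scan with a running overwritten result by a reverse scan that returns the first hit (simpler, early exit).

-- ===== PORT A =====
-- inner 'for value in values: if kata in value: kataDalamKalimat = word; break'
def pvInnerA (kata word : String) (acc : Option String) : List String → Option String
  | [] => acc
  | v :: vs => if PySem.Str.isIn kata v then some word else pvInnerA kata word acc vs

def cari_kataDalamKalimat (kata : String) (data : List (String × List String)) : Option String :=
  data.foldl (fun acc wv => pvInnerA kata wv.1 acc wv.2) none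

-- ===== PORT B =====
def cari_kataDalamKalimat_alt (kata : String) (data : List (String × List String)) : Option String :=
  (data.reverse.find? (fun wv => wv.2.any (fun v => PySem.Str.isIn kata v))).map (·.1)

-- ===== PRECONDITION & SPEC =====
def Spec_cari_kataDalamKalimat (kata : String) (data : List (String × List String)) (out : Option String) : Prop := out = cari_kataDalamKalimat_alt kata data
instance (kata : String) (data : List (String × List String)) (out : Option String) : Decidable (Spec_cari_kataDalamKalimat kata data out) := by unfold Spec_cari_kataDalamKalimat; infer_instance

-- ===== CLAIM (what is proved, stated in full; the proofs are below) =====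
def Claim_equal_cari_kataDalamKalimat : Prop := ∀ (kata : String) (data : List (String × List String)), Dom_cari_kataDalamKalimat kata data → Spec_cari_kataDalamKalimat kata data (cari_kataDalamKalimat kata data)

-- ===== LEMMAS AND PROOFS =====
lemma pvInnerA_eq (kata word : String) (acc : Option String) (vs : List String) :
    pvInnerA kata word acc vs = if vs.any (fun v => PySem.Str.isIn kata v) then some word else acc := by
  induction vs with
  | nil => rfl
  | cons v vs ih =>
      simp only [pvInnerA, List.any_cons, Bool.or_eq_true, ih]
      split_ifs <;> tauto

lemma pvFold_eq (kata : String) (l : List (String × List String)) (acc : Option String) :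
    l.foldl (fun acc wv => pvInnerA kata wv.1 acc wv.2) acc =
      match l.reverse.find? (fun wv => wv.2.any (fun v => PySem.Str.isIn kata v)) with
      | some x => some x.1
      | none => acc := by
  induction l generalizing acc with
  | nil => rfl
  | cons x l ih =>
      simp only [List.foldl_cons, ih, List.reverse_cons, List.find?_append]
      cases h : l.reverse.find? (fun wv => wv.2.any (fun v => PySem.Str.isIn kata v)) with
      | some y => simp
      | none =>
          rw [pvInnerA_eq]
          by_cases hx : (x.2.any (fun v => PySem.Str.isIn kata v)) = true <;>
            simp only [List.find?, hx] <;> simp_all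

-- ===== VERDICT (by name: the statement is the Claim_ definition above) =====
theorem cari_kataDalamKalimat_spec : Claim_equal_cari_kataDalamKalimat := by
  intro kata data _
  unfold Spec_cari_kataDalamKalimat cari_kataDalamKalimat cari_kataDalamKalimat_alt
  rw [pvFold_eq]
  cases h : data.reverse.find? (fun wv => wv.2.any (fun v => PySem.Str.isIn kata v)) <;> simp
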